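-- pv_equiv track=rewrite | github.com/Emre-Bozkurt-xyz/2XC3-FinalProject | final_project_part3.py | is_same_line_path
-- ===== SOURCE A (Python) =====
-- def get_path_lines(path, edge_lines):
--     path_lines = []
--     for i in range(len(path) - 1):
--         u = path[i]
--         v = path[i + 1]
--         lines = edge_lines.get((u, v), set())
--         path_lines.append(lines)
--     return path_lines
--
-- def is_same_line_path(path, edge_lines):
--     if len(path) < 2:
--         return True
--
--     edge_line_sets = get_path_lines(path, edge_lines)
--     common = set(edge_line_sets[0])
--
--     for lines in edge_line_sets[1:]:
--         common = common.intersection(lines)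
--         if not common:
--             return False
--
--     return True
-- ===== SOURCE B (Python) =====
-- def is_same_line_path(path, edge_lines):
--     if len(path) < 2:
--         return True
--     sets = [edge_lines.get((u, v), set()) for u, v in zip(path, path[1:])]
--     first, *rest = sets
--     if not rest:
--         return True
--     return any(all(line in s for s in rest) for line in first)
-- ===== Notes on version B (the rewrite author's own statement) =====
-- stated objective: alternative
-- what changed: Replaces the progressive set-intersection loop with early exit by a candidate-and-verify scan: each line of the first edge is checked for membership in all remaining edges' sets via any/all over adjacent pairs from zip, with no intermediate intersection sets built.
import Mathlib
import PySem

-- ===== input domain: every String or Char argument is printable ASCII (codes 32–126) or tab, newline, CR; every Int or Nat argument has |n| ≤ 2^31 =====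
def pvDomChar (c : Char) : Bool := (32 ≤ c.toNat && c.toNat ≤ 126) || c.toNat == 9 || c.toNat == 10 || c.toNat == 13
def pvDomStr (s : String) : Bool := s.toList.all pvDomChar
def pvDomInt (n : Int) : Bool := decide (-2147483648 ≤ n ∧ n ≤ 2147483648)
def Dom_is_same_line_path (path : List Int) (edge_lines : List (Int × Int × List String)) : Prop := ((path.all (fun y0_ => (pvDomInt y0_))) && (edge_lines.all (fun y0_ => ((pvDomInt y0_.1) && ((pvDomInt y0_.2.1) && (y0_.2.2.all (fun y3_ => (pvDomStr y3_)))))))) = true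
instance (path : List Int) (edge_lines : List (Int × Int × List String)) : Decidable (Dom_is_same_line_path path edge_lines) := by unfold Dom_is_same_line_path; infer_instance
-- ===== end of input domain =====

-- ===== PORT A =====
-- B changes the decomposition: candidate-and-verify any/all scan instead of A's progressive intersection loop.
-- shared transcription of edge_lines.get((u, v), set()) on the flattened association list
def lookupEdge (edge_lines : List (Int × Int × List String)) (u v : Int) : List String :=
  match edge_lines with
  | [] => []
  | (a, b, s) :: rest => if a = u ∧ b = v then s else lookupEdge rest u v

def get_path_lines (path : List Int) (edge_lines : List (Int × Int × List String)) :
    List (List String) :=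
  (PySem.List.pyRange 0 ((path.length : Int) - 1) 1).foldl
    (fun acc i =>
      acc ++ [lookupEdge edge_lines (PySem.List.pyGetD path i 0) (PySem.List.pyGetD path (i + 1) 0)])
    []

-- the for-loop over edge_line_sets[1:] with its early `return False`
def interLoop (common : List String) (rest : List (List String)) : Bool :=
  match rest with
  | [] => true
  | l :: ls =>
      let c := PySem.Set.inter common l
      if c = [] then false else interLoop c ls

def is_same_line_path (path : List Int) (edge_lines : List (Int × Int × List String)) : Bool :=
  if path.length < 2 then true
  else
    let edge_line_sets := get_path_lines path edge_lines
    let common := PySem.Set.ofList (PySem.List.pyGetD edge_line_sets 0 [])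
    interLoop common (PySem.List.slice edge_line_sets (some 1) none)

-- ===== PORT B =====
def is_same_line_path_alt (path : List Int) (edge_lines : List (Int × Int × List String)) : Bool :=
  if path.length < 2 then true
  else
    match (path.zip path.tail).map (fun p => lookupEdge edge_lines p.1 p.2) with
    | [] => true
    | first :: rest =>
        if rest = [] then true
        else first.any (fun line => rest.all (fun s => s.contains line))

-- ===== PRECONDITION & SPEC =====
def Spec_is_same_line_path (path : List Int) (edge_lines : List (Int × Int × List String)) (out : Bool) : Prop := out = is_same_line_path_alt path edge_lines
instance (path : List Int) (edge_lines : List (Int × Int × List String)) (out : Bool) : Decidable (Spec_is_same_line_path path edge_lines out) := by unfold Spec_is_same_line_path; infer_instance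

-- ===== CLAIM (what is proved, stated in full; the proofs are below) =====
def Claim_equal_is_same_line_path : Prop := ∀ (path : List Int) (edge_lines : List (Int × Int × List String)), Dom_is_same_line_path path edge_lines → Spec_is_same_line_path path edge_lines (is_same_line_path path edge_lines)

-- ===== LEMMAS AND PROOFS =====

lemma gpl_aux (path : List Int) (edge_lines : List (Int × Int × List String)) :
    (List.range (path.length - 1)).map
        (fun k => lookupEdge edge_lines (path.getD k 0) (path.getD (k + 1) 0)) =
      (path.zip path.tail).map (fun p => lookupEdge edge_lines p.1 p.2) := by
  induction path with
  | nil => simp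
  | cons u t ih =>
    cases t with
    | nil => simp
    | cons v t' =>
      have hlen : (u :: v :: t').length - 1 = (v :: t').length - 1 + 1 := by simp
      rw [hlen, List.range_succ_eq_map, List.map_cons, List.map_map]
      simp only [List.zip_cons_cons, List.tail_cons, List.map_cons]
      refine congrArg₂ _ rfl ?_
      simp only [List.tail_cons] at ih
      rw [← ih]
      refine List.map_congr_left fun k hk => ?_
      simp [Nat.succ_eq_add_one]

lemma gpl_eq (path : List Int) (edge_lines : List (Int × Int × List String)) :
    get_path_lines path edge_lines =
      (path.zip path.tail).map (fun p => lookupEdge edge_lines p.1 p.2) := by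
  unfold get_path_lines
  rw [PySem.List.foldl_append_singleton_eq_map, PySem.List.pyRange_one, List.map_map]
  have h : ((path.length : Int) - 1 - 0).toNat = path.length - 1 := by omega
  rw [h, ← gpl_aux path edge_lines]
  refine List.map_congr_left fun k hk => ?_
  have h1 : (0 : Int) + (k : Int) = ((k : Nat) : Int) := by ring
  simp only [Function.comp, h1, PySem.List.pyGetD_natCast]
  norm_cast
  rw [PySem.List.pyGetD_natCast]

lemma interLoop_eq (rest : List (List String)) (common : List String) :
    interLoop common rest =
      (decide (rest = []) || common.any (fun x => rest.all (fun s => s.contains x))) := by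
  induction rest generalizing common with
  | nil => simp [interLoop]
  | cons l ls ih =>
    show (if PySem.Set.inter common l = [] then false else interLoop (PySem.Set.inter common l) ls) = _
    by_cases hc : PySem.Set.inter common l = []
    · rw [if_pos hc]
      simp only [PySem.Set.inter, List.filter_eq_nil_iff] at hc
      symm
      apply Bool.or_eq_false_iff.mpr
      refine ⟨by simp, ?_⟩
      simp only [List.any_eq_false]
      intro x hx
      have := hc x hx
      simp only [PySem.Set.contains] at this
      simp [List.all_cons]
      intro hxl
      exact absurd (by simpa using hxl) this
    · rw [if_neg hc, ih]
      simp only [PySem.Set.inter, List.any_filter, List.all_cons]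
      cases ls with
      | nil =>
        obtain ⟨x, hxm⟩ := List.exists_mem_of_ne_nil _ hc
        have hx := List.mem_filter.mp hxm
        have hxl : x ∈ l := by
          have := hx.2
          simp only [PySem.Set.contains] at this
          simpa using this
        simp
        exact ⟨x, hx.1, hxl⟩
      | cons m ms => simp

lemma any_ofList (l : List String) (p : String → Bool) :
    (PySem.Set.ofList l).any p = l.any p := by
  rw [Bool.eq_iff_iff]
  simp only [List.any_eq_true]
  constructor
  · rintro ⟨x, hx, hp⟩; exact ⟨x, (PySem.Set.mem_ofList l x).mp hx, hp⟩
  · rintro ⟨x, hx, hp⟩; exact ⟨x, (PySem.Set.mem_ofList l x).mpr hx, hp⟩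

-- ===== VERDICT (by name: the statement is the Claim_ definition above) =====
theorem is_same_line_path_spec : Claim_equal_is_same_line_path := by
  intro path edge_lines _
  unfold Spec_is_same_line_path
  by_cases h : path.length < 2
  · simp [is_same_line_path, is_same_line_path_alt, h]
  · match path, h with
    | [], h => exact absurd (by simp) h
    | [a], h => exact absurd (by simp) h
    | a :: b :: t, h =>
      simp only [is_same_line_path, is_same_line_path_alt, if_neg h]
      rw [gpl_eq]
      simp only [List.tail_cons, List.zip_cons_cons, List.map_cons,
        PySem.List.pyGetD_zero_cons, PySem.List.slice_from_one, List.tail_cons]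
      rw [interLoop_eq, any_ofList]
      by_cases hr : ((b :: t).zip t).map (fun p => lookupEdge edge_lines p.1 p.2) = []
      · simp [hr]
      · simp [hr]
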